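-- pv_equiv track=rewrite | github.com/chamsslash/ege_Informatics | 23/hm/8.py | task23
-- ===== SOURCE A (Python) =====
-- def task23(start,end,num):
--     if start == end and "".join(sorted(num)) == num:
--         return 1
--     if start > end:
--         return 0
--     return (
--         task23(start*3,end,num+'1')
--         + task23(start*2,end,num+'2')
--         + task23(start+2,end,num+'3')
--         + task23(start+1,end,num+'4')
--     )
-- ===== SOURCE B (Python) =====
-- def task23(start, end, num):
--     # closed-form enumeration: valid op strings are a *3's, then b *2's, then c +2's,
--     # then d +1's (labels '1'<'2'<'3'<'4' nondecreasing), first label >= last char of num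
--     ok = all(a <= b for a, b in zip(num, num[1:]))
--     if start == end and ok:
--         return 1
--     if start > end or not ok:
--         return 0
--     last = num[-1] if num else '1'
--     total = 0
--     v3, m3 = start, last
--     while v3 <= end:
--         v2, m2 = v3, m3
--         while v2 <= end:
--             r = end - v2
--             if m2 <= '3':
--                 total += r // 2 + 1
--             elif m2 <= '4':
--                 total += 1
--             elif r == 0:
--                 total += 1
--             if m2 > '2':
--                 break
--             v2, m2 = v2 * 2, '2'
--         if m3 > '1':
--             break
--         v3, m3 = v3 * 3, '1'
--     return total
-- ===== Notes on version B (the rewrite author's own statement) =====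
-- stated objective: alternative
-- what changed: B replaces A's exhaustive 4-way recursion over all op strings by a closed-form enumeration: valid sequences are a *3's, then b *2's, then c +2's, then d +1's, so B loops over the choices of (a,b) and counts the (c,d) pairs arithmetically.
import Mathlib
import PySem

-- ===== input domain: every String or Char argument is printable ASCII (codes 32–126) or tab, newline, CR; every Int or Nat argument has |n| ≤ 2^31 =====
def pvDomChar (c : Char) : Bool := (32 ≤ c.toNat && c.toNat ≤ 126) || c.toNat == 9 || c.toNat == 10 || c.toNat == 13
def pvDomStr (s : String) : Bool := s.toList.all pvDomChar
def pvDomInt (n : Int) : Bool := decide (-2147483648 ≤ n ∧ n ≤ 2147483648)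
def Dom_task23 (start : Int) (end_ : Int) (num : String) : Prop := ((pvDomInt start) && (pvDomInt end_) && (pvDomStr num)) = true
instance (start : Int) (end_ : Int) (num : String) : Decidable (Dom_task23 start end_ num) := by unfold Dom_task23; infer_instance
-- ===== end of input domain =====

-- B replaces A's exhaustive 4-way recursion by a closed-form enumeration over the *3/*2 prefixes,
-- counting the +2/+1 tails arithmetically (objective: alternative).

-- ===== PORT A =====
-- '"".join(sorted(num)) == num': Python's sorted on the characters, compared with num
-- (string equality compared on the character lists; ''.join of the chars is the string of those chars).
def task23SortedA (n : List Char) : Bool :=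
  decide (PySem.List.sorted n (fun c => c) false = n)

-- A's recursion, fuelled for totality: each call appends one op, and under Pre_ the value rises by
-- at least 1 per step, so fuel (end_-start).toNat+1 is never exhausted there (fuel 0 is then dead).
def task23Aux : Nat → Int → Int → List Char → Int
  | 0, _, _, _ => 0
  | f+1, s, e, n =>
    if s = e ∧ task23SortedA n then 1
    else if s > e then 0
    else
      task23Aux f (s*3) e (n ++ ['1']) + task23Aux f (s*2) e (n ++ ['2'])
        + task23Aux f (s+2) e (n ++ ['3']) + task23Aux f (s+1) e (n ++ ['4'])

def task23 (start : Int) (end_ : Int) (num : String) : Int :=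
  task23Aux ((end_ - start).toNat + 1) start end_ num.toList

-- ===== PORT B =====
-- 'all(a <= b for a, b in zip(num, num[1:]))'
def altSorted (n : List Char) : Bool :=
  (n.zip n.tail).all (fun p => decide (p.1 ≤ p.2))

-- 'num[-1] if num else '1''
def altLast (n : List Char) : Char := n.getLastD '1'

-- one inner-loop iteration's contribution to total, at value v with minimum allowed label m
def altCd (e : Int) (m : Char) (v : Int) : Int :=
  if m ≤ '3' then PySem.Int.floordiv (e - v) 2 + 1
  else if m ≤ '4' then 1
  else if e - v = 0 then 1 else 0

-- the inner 'while v2 <= end' loop (fuel only for totality; unreachable exhaustion for 1 ≤ v)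
def altLoop2 : Nat → Int → Int → Char → Int
  | 0, _, _, _ => 0
  | f+1, e, v, m =>
    if v ≤ e then altCd e m v + (if m ≤ '2' then altLoop2 f e (v*2) '2' else 0) else 0

-- the outer 'while v3 <= end' loop
def altLoop3 : Nat → Int → Int → Char → Int
  | 0, _, _, _ => 0
  | f+1, e, v, m =>
    if v ≤ e then
      altLoop2 ((e - v).toNat + 1) e v m + (if m ≤ '1' then altLoop3 f e (v*3) '1' else 0)
    else 0

def task23_alt (start : Int) (end_ : Int) (num : String) : Int :=
  let n := num.toList
  if start = end_ ∧ altSorted n then 1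
  else if start > end_ ∨ ¬ altSorted n then 0
  else altLoop3 ((end_ - start).toNat + 1) end_ start (altLast n)

-- ===== PRECONDITION & SPEC =====
-- Pre_ excludes exactly the inputs on which A never returns (RecursionError): start ≤ 0 with
-- start ≤ end_ and no immediate base case, where the *3/*2 branches never increase the value.
def Pre_task23 (start : Int) (end_ : Int) (num : String) : Prop :=
  end_ < start ∨ 1 ≤ start ∨ (start = end_ ∧ List.Pairwise (· ≤ ·) num.toList)
instance (start : Int) (end_ : Int) (num : String) : Decidable (Pre_task23 start end_ num) := by
  unfold Pre_task23; infer_instance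

def pvWitness_task23 : Int × Int × String := (1, 6, "13")

def Spec_task23 (start : Int) (end_ : Int) (num : String) (out : Int) : Prop := out = task23_alt start end_ num
instance (start : Int) (end_ : Int) (num : String) (out : Int) : Decidable (Spec_task23 start end_ num out) := by unfold Spec_task23; infer_instance

-- ===== CLAIM (what is proved, stated in full; the proofs are below) =====
def Claim_equal_task23 : Prop := ∀ (start : Int) (end_ : Int) (num : String), Dom_task23 start end_ num → Pre_task23 start end_ num → Spec_task23 start end_ num (task23 start end_ num)

-- ===== LEMMAS AND PROOFS =====

-- A's sortedness test is "the characters are nondecreasing"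
lemma sortedA_iff_pairwise (n : List Char) :
    task23SortedA n = true ↔ List.Pairwise (· ≤ ·) n := by
  unfold task23SortedA
  rw [decide_eq_true_iff]
  constructor
  · intro h
    have := PySem.List.sorted_pairwise (xs := n) (key := fun c => c)
    rwa [h] at this
  · intro h
    exact PySem.List.sorted_eq_self_of_pairwise n (fun c => c) h

-- B's sortedness test does the same
lemma sortedB_iff_pairwise (n : List Char) :
    altSorted n = true ↔ List.Pairwise (· ≤ ·) n := by
  rw [← List.isChain_iff_pairwise]
  unfold altSorted
  induction n with
  | nil => simp
  | cons a t ih =>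
    cases t with
    | nil => simp
    | cons b t' =>
      rw [List.isChain_cons_cons, ← ih]
      simp

lemma altLast_append (n : List Char) (c : Char) : altLast (n ++ [c]) = c := by
  simp [altLast]

lemma altLast_mem (n : List Char) (h : n ≠ []) : altLast n ∈ n := by
  cases n with
  | nil => exact absurd rfl h
  | cons a t => exact List.mem_of_getLast? rfl

lemma altLast_cons_cons (a b : Char) (t : List Char) :
    altLast (a :: b :: t) = altLast (b :: t) := by
  simp [altLast]

lemma le_altLast_of_mem (n : List Char) (hp : List.Pairwise (· ≤ ·) n) :
    ∀ x ∈ n, x ≤ altLast n := by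
  induction n with
  | nil => intro x hx; simp at hx
  | cons a t ih =>
    rw [List.pairwise_cons] at hp
    intro x hx
    cases t with
    | nil =>
      rw [List.mem_singleton] at hx
      subst hx
      simp [altLast]
    | cons b t' =>
      rw [altLast_cons_cons]
      rcases List.mem_cons.mp hx with rfl | hxt
      · exact hp.1 _ (altLast_mem (b :: t') (by simp))
      · exact ih hp.2 _ hxt

lemma chain_append_iff (n : List Char) (c : Char) (hn : List.Pairwise (· ≤ ·) n) (hc : '1' ≤ c) :
    List.Pairwise (· ≤ ·) (n ++ [c]) ↔ altLast n ≤ c := by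
  rw [List.pairwise_append]
  constructor
  · rintro ⟨-, -, hall⟩
    cases hne : n with
    | nil => simpa [altLast] using hc
    | cons a t =>
      exact hall _ (hne ▸ altLast_mem n (by simp [hne])) c (by simp)
  · intro hle
    refine ⟨hn, List.pairwise_singleton _ _, ?_⟩
    intro x hx y hy
    rw [List.mem_singleton] at hy
    subst hy
    exact le_trans (le_altLast_of_mem n hn x hx) hle

lemma unsorted_zero (f : Nat) (s e : Int) (n : List Char)
    (h : ¬ List.Pairwise (· ≤ ·) n) : task23Aux f s e n = 0 := by
  induction f generalizing s n with
  | zero => rfl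
  | succ f ih =>
    have hsA : ¬ task23SortedA n = true := fun ht => h ((sortedA_iff_pairwise n).mp ht)
    have happ : ∀ c : Char, ¬ List.Pairwise (· ≤ ·) (n ++ [c]) := by
      intro c hcontra
      exact h (List.pairwise_append.mp hcontra).1
    simp only [task23Aux]
    rw [if_neg (by simp [hsA])]
    by_cases hse : s > e
    · rw [if_pos hse]
    · rw [if_neg hse, ih _ _ (happ '1'), ih _ _ (happ '2'), ih _ _ (happ '3'), ih _ _ (happ '4')]
      norm_num

-- the proof-side recursion on (value, minimum allowed label)
def gC : Nat → Int → Int → Char → Int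
  | 0, _, _, _ => 0
  | f+1, e, s, m =>
    if s = e then 1
    else if s > e then 0
    else
      (if m ≤ '1' then gC f e (s*3) '1' else 0) + (if m ≤ '2' then gC f e (s*2) '2' else 0)
        + (if m ≤ '3' then gC f e (s+2) '3' else 0) + (if m ≤ '4' then gC f e (s+1) '4' else 0)

-- A's recursion, on a sorted prefix, is gC at the prefix's last character
lemma auxA_eq_gC (f : Nat) (s e : Int) (n : List Char) (h : List.Pairwise (· ≤ ·) n) :
    task23Aux f s e n = gC f e s (altLast n) := by
  induction f generalizing s n with
  | zero => rfl
  | succ f ih =>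
    have hsA : task23SortedA n = true := (sortedA_iff_pairwise n).mpr h
    simp only [task23Aux, gC, hsA, and_true]
    by_cases hse : s = e
    · simp [hse]
    · rw [if_neg hse, if_neg hse]
      by_cases hgt : s > e
      · rw [if_pos hgt, if_pos hgt]
      · rw [if_neg hgt, if_neg hgt]
        have step : ∀ (c : Char) (s' : Int), '1' ≤ c →
            task23Aux f s' e (n ++ [c]) = (if altLast n ≤ c then gC f e s' c else 0) := by
          intro c s' hc
          by_cases hch : List.Pairwise (· ≤ ·) (n ++ [c])
          · rw [ih _ _ hch, altLast_append,
              if_pos ((chain_append_iff n c h hc).mp hch)]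
          · rw [unsorted_zero f s' e _ hch,
              if_neg (fun hle => hch ((chain_append_iff n c h hc).mpr hle))]
        rw [step '1' (s*3) (by decide), step '2' (s*2) (by decide),
          step '3' (s+2) (by decide), step '4' (s+1) (by decide)]

lemma altLoop2_of_gt (f : Nat) (e v : Int) (m : Char) (h : e < v) : altLoop2 f e v m = 0 := by
  cases f with
  | zero => rfl
  | succ f => simp [altLoop2, not_le.mpr h]

lemma altLoop3_of_gt (f : Nat) (e v : Int) (m : Char) (h : e < v) : altLoop3 f e v m = 0 := by
  cases f with
  | zero => rfl
  | succ f => simp [altLoop3, not_le.mpr h]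

lemma gC4 (f : Nat) (e s : Int) (hf : e - s < (f : Int)) (hs : 1 ≤ s) :
    gC f e s '4' = if s ≤ e then 1 else 0 := by
  induction f generalizing s with
  | zero =>
    norm_num at hf
    simp [gC, show ¬ s ≤ e by omega]
  | succ f ih =>
    simp only [gC]
    by_cases hse : s = e
    · simp [hse]
    · rw [if_neg hse]
      by_cases hgt : s > e
      · rw [if_pos hgt, if_neg (by omega)]
      · rw [if_neg hgt,
          if_neg (by decide : ¬ ('4':Char) ≤ '1'), if_neg (by decide : ¬ ('4':Char) ≤ '2'),
          if_neg (by decide : ¬ ('4':Char) ≤ '3'), if_pos (by decide : ('4':Char) ≤ '4'),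
          ih (s+1) (by push_cast at hf ⊢; omega) (by omega),
          if_pos (show s + 1 ≤ e by omega), if_pos (show s ≤ e by omega)]
        norm_num

lemma gC3 (f : Nat) (e s : Int) (hf : e - s < (f : Int)) (hs : 1 ≤ s) :
    gC f e s '3' = if s ≤ e then PySem.Int.floordiv (e - s) 2 + 1 else 0 := by
  induction f generalizing s with
  | zero =>
    norm_num at hf
    simp [gC, show ¬ s ≤ e by omega]
  | succ f ih =>
    simp only [gC]
    by_cases hse : s = e
    · subst hse
      rw [if_pos rfl, if_pos le_rfl]
      norm_num [PySem.Int.floordiv]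
    · rw [if_neg hse]
      by_cases hgt : s > e
      · rw [if_pos hgt, if_neg (by omega)]
      · rw [if_neg hgt,
          if_neg (by decide : ¬ ('3':Char) ≤ '1'), if_neg (by decide : ¬ ('3':Char) ≤ '2'),
          if_pos (by decide : ('3':Char) ≤ '3'), if_pos (by decide : ('3':Char) ≤ '4'),
          ih (s+2) (by push_cast at hf ⊢; omega) (by omega),
          gC4 f e (s+1) (by push_cast at hf ⊢; omega) (by omega),
          if_pos (show s + 1 ≤ e by omega), if_pos (show s ≤ e by omega),
          PySem.Int.floordiv_eq_ediv_of_pos (a := e - s) (b := 2) (by norm_num)]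
        by_cases h2 : s + 2 ≤ e
        · rw [if_pos h2,
            PySem.Int.floordiv_eq_ediv_of_pos (a := e - (s+2)) (b := 2) (by norm_num)]
          omega
        · rw [if_neg h2]
          omega

-- the +2/+1 tail contributions of gC equal one altCd term (the inner loop body)
lemma gC_tail_eq_altCd (f : Nat) (e s : Int) (m : Char)
    (hf : e - s - 1 < (f : Int)) (hs : 1 ≤ s) (hlt : s < e) :
    (if m ≤ '3' then gC f e (s+2) '3' else 0) + (if m ≤ '4' then gC f e (s+1) '4' else 0)
      = altCd e m s := by
  rw [gC3 f e (s+2) (by omega) (by omega),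
    gC4 f e (s+1) (by omega) (by omega)]
  unfold altCd
  by_cases h3 : m ≤ '3'
  · have h4 : m ≤ '4' := le_trans h3 (by decide)
    rw [if_pos h3, if_pos h4, if_pos h3, if_pos (show s + 1 ≤ e by omega),
      PySem.Int.floordiv_eq_ediv_of_pos (a := e - s) (b := 2) (by norm_num)]
    by_cases h2 : s + 2 ≤ e
    · rw [if_pos h2,
        PySem.Int.floordiv_eq_ediv_of_pos (a := e - (s+2)) (b := 2) (by norm_num)]
      omega
    · rw [if_neg h2]
      omega
  · rw [if_neg h3, if_neg h3]
    by_cases h4 : m ≤ '4'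
    · rw [if_pos h4, if_pos h4, if_pos (show s + 1 ≤ e by omega)]
      omega
    · rw [if_neg h4, if_neg h4, if_neg (show ¬ e - s = 0 by omega)]
      omega

lemma altCd_self (e : Int) (m : Char) : altCd e m e = 1 := by
  unfold altCd
  by_cases h3 : m ≤ '3'
  · rw [if_pos h3]; norm_num [PySem.Int.floordiv]
  · rw [if_neg h3]
    by_cases h4 : m ≤ '4' <;> simp [h4]

-- gC with a minimum label ≥ '2' is the inner loop
lemma gC_eq_altLoop2 (f : Nat) (e : Int) : ∀ (f2 : Nat) (s : Int) (m : Char),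
    e - s < (f : Int) → e - s < (f2 : Int) → 1 ≤ s → ¬ m ≤ '1' →
    gC f e s m = altLoop2 f2 e s m := by
  induction f with
  | zero =>
    intro f2 s m hf _ _ _
    push_cast at hf
    rw [show gC 0 e s m = 0 from rfl, altLoop2_of_gt f2 e s m (by omega)]
  | succ f ih =>
    intro f2 s m hf hf2 hs hm
    by_cases hgt : e < s
    · rw [altLoop2_of_gt f2 e s m hgt]
      simp only [gC]
      rw [if_neg (by omega), if_pos (by omega)]
    · obtain ⟨k, rfl⟩ : ∃ k, f2 = k + 1 := ⟨f2 - 1, by omega⟩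
      simp only [gC, altLoop2]
      rw [if_pos (show s ≤ e by omega)]
      by_cases hse : s = e
      · subst hse
        rw [if_pos rfl, altCd_self, altLoop2_of_gt k s (s*2) '2' (by omega)]
        norm_num
      · rw [if_neg hse, if_neg (show ¬ s > e by omega), if_neg hm]
        have h12 : (m ≤ '2' → gC f e (s*2) '2' = altLoop2 k e (s*2) '2') := fun _ =>
          ih k (s*2) '2' (by push_cast at hf ⊢; omega) (by push_cast at hf2 ⊢; omega)
            (by omega) (by decide)
        have htail := gC_tail_eq_altCd f e s m (by push_cast at hf ⊢; omega) hs (by omega)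
        by_cases h2 : m ≤ '2'
        · rw [if_pos h2, if_pos h2, h12 h2]
          omega
        · rw [if_neg h2, if_neg h2]
          omega

-- gC is the outer loop
lemma gC_eq_altLoop3 (f : Nat) (e : Int) : ∀ (f3 : Nat) (s : Int) (m : Char),
    e - s < (f : Int) → e - s < (f3 : Int) → 1 ≤ s →
    gC f e s m = altLoop3 f3 e s m := by
  induction f with
  | zero =>
    intro f3 s m hf _ _
    push_cast at hf
    rw [show gC 0 e s m = 0 from rfl, altLoop3_of_gt f3 e s m (by omega)]
  | succ f ih =>
    intro f3 s m hf hf3 hs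
    by_cases hgt : e < s
    · rw [altLoop3_of_gt f3 e s m hgt]
      simp only [gC]
      rw [if_neg (by omega), if_pos (by omega)]
    · obtain ⟨k, rfl⟩ : ∃ k, f3 = k + 1 := ⟨f3 - 1, by omega⟩
      simp only [gC, altLoop3]
      rw [if_pos (show s ≤ e by omega)]
      by_cases hse : s = e
      · subst hse
        have hl2 : altLoop2 ((s - s).toNat + 1) s s m = 1 := by
          simp only [altLoop2, sub_self, Int.toNat_zero]
          rw [if_pos (le_refl s), altCd_self]
          split <;> norm_num
        rw [if_pos rfl, hl2, altLoop3_of_gt k s (s*3) '1' (by omega)]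
        norm_num
      · rw [if_neg hse, if_neg (show ¬ s > e by omega)]
        obtain ⟨k2, hk2⟩ : ∃ k2, (e - s).toNat + 1 = k2 + 1 := ⟨(e - s).toNat, rfl⟩
        rw [hk2]
        simp only [altLoop2]
        rw [if_pos (show s ≤ e by omega)]
        have h12 : (m ≤ '2' → gC f e (s*2) '2' = altLoop2 k2 e (s*2) '2') := fun _ =>
          gC_eq_altLoop2 f e k2 (s*2) '2' (by push_cast at hf ⊢; omega)
            (by omega) (by omega) (by decide)
        have h11 : (m ≤ '1' → gC f e (s*3) '1' = altLoop3 k e (s*3) '1') := fun _ =>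
          ih k (s*3) '1' (by push_cast at hf ⊢; omega) (by push_cast at hf3 ⊢; omega) (by omega)
        have htail := gC_tail_eq_altCd f e s m (by push_cast at hf ⊢; omega) hs (by omega)
        by_cases h1 : m ≤ '1'
        · have h2 : m ≤ '2' := le_trans h1 (by decide)
          rw [if_pos h1, if_pos h2, if_pos h1, if_pos h2, h11 h1, h12 h2]
          omega
        · rw [if_neg h1, if_neg h1]
          by_cases h2 : m ≤ '2'
          · rw [if_pos h2, if_pos h2, h12 h2]
            omega
          · rw [if_neg h2, if_neg h2]
            omega

-- ===== VERDICT (by name: the statement is the Claim_ definition above) =====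
theorem task23_spec : Claim_equal_task23 := by
  intro s e num _ hpre
  unfold Spec_task23 task23 task23_alt
  set n := num.toList with hn
  by_cases hsor : List.Pairwise (· ≤ ·) n
  · have hB : altSorted n = true := (sortedB_iff_pairwise n).mpr hsor
    rw [auxA_eq_gC _ _ _ _ hsor]
    by_cases hse : s = e
    · subst hse
      rw [if_pos ⟨rfl, hB⟩]
      simp [gC]
    · by_cases hgt : s > e
      · simp only [gC]
        rw [if_neg hse, if_pos hgt, if_neg (by simp [hse, hB]), if_pos (Or.inl hgt)]
      · have hs1 : 1 ≤ s := by
          rcases hpre with h | h | ⟨h, _⟩ <;> omega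
        rw [if_neg (by simp [hse, hB]), if_neg (by simp [hB]; omega)]
        exact gC_eq_altLoop3 _ e _ s (altLast n) (by push_cast; omega) (by push_cast; omega) hs1
  · have hA0 : task23Aux ((e - s).toNat + 1) s e n = 0 := unsorted_zero _ s e n hsor
    have hB : altSorted n ≠ true := fun h => hsor ((sortedB_iff_pairwise n).mp h)
    rw [hA0, if_neg (by simp [hB]), if_pos (Or.inr hB)]
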